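-- pv_equiv track=rewrite | github.com/Xyfuture/MatrixMachine | matrixmachine/strategy/code_search.py | _calculate_split_boundaries
-- ===== SOURCE A (Python) =====
-- from typing import Dict, List, Optional, Set, Tuple
--
-- def _calculate_split_boundaries(dimension: int, num_splits: int) -> List[Tuple[int, int]]:
--     if num_splits <= 0:
--         return [(0, dimension)]
--     base = dimension // num_splits
--     remainder = dimension % num_splits
--     bounds: List[Tuple[int, int]] = []
--     start = 0
--     for i in range(num_splits):
--         size = base + (1 if i < remainder else 0)
--         end = start + size
--         bounds.append((start, end))
--         start = end
--     return bounds
-- ===== SOURCE B (Python) =====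
-- from typing import Dict, List, Optional, Set, Tuple
--
-- def _calculate_split_boundaries(dimension: int, num_splits: int) -> List[Tuple[int, int]]:
--     if num_splits <= 0:
--         return [(0, dimension)]
--     base = dimension // num_splits
--     remainder = dimension % num_splits
--     positions = [i * base + min(i, remainder) for i in range(num_splits + 1)]
--     return list(zip(positions, positions[1:]))
-- ===== Notes on version B (the rewrite author's own statement) =====
-- stated objective: alternative
-- what changed: Each boundary position is computed independently from the closed form i*base + min(i, remainder) and the pairs are formed by zipping the position list with its tail, replacing A's stateful accumulation of a running start.
import Mathlib
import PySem

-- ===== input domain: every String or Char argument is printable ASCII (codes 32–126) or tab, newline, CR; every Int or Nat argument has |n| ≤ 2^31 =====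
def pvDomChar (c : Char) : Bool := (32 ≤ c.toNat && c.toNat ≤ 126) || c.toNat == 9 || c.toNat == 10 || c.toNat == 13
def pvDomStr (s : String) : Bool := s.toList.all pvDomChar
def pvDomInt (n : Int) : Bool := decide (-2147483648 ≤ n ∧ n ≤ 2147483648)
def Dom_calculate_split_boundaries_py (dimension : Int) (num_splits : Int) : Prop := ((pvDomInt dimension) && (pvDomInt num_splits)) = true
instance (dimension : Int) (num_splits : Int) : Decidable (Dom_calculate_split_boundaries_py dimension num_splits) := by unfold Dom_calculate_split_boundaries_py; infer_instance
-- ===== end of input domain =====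

-- B computes each boundary position independently from a closed form and zips, instead of threading a running start (alternative decomposition, same cost).


-- ===== PORT A =====
def calculate_split_boundaries_py (dimension : Int) (num_splits : Int) : List (Int × Int) :=
  if num_splits ≤ 0 then [(0, dimension)]
  else
    let base := PySem.Int.floordiv dimension num_splits
    let remainder := PySem.Int.mod dimension num_splits
    let st := (PySem.List.pyRange 0 num_splits 1).foldl
      (fun (acc : List (Int × Int) × Int) (i : Int) =>
        let size := base + (if i < remainder then 1 else 0)
        let e := acc.2 + size
        (acc.1 ++ [(acc.2, e)], e))
      (([] : List (Int × Int)), (0 : Int))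
    st.1

-- ===== PORT B =====
def calculate_split_boundaries_py_alt (dimension : Int) (num_splits : Int) : List (Int × Int) :=
  if num_splits ≤ 0 then [(0, dimension)]
  else
    let base := PySem.Int.floordiv dimension num_splits
    let remainder := PySem.Int.mod dimension num_splits
    let positions := (PySem.List.pyRange 0 (num_splits + 1) 1).map
      (fun i => i * base + min i remainder)
    positions.zip positions.tail

-- ===== PRECONDITION & SPEC =====
def Spec_calculate_split_boundaries_py (dimension : Int) (num_splits : Int) (out : List (Int × Int)) : Prop := out = calculate_split_boundaries_py_alt dimension num_splits
instance (dimension : Int) (num_splits : Int) (out : List (Int × Int)) : Decidable (Spec_calculate_split_boundaries_py dimension num_splits out) := by unfold Spec_calculate_split_boundaries_py; infer_instance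

-- ===== CLAIM (what is proved, stated in full; the proofs are below) =====
def Claim_equal_calculate_split_boundaries_py : Prop := ∀ (dimension : Int) (num_splits : Int), Dom_calculate_split_boundaries_py dimension num_splits → Spec_calculate_split_boundaries_py dimension num_splits (calculate_split_boundaries_py dimension num_splits)

-- ===== LEMMAS AND PROOFS =====

-- closed-form position function
def pvPos (base remainder : Int) (i : Int) : Int := i * base + min i remainder

-- one step advances the position: pos (k+1) = pos k + size k, for 0 ≤ remainder
lemma pvPos_step (base remainder : Int) (k : Int) :
    pvPos base remainder (k + 1) =
      pvPos base remainder k + (base + (if k < remainder then 1 else 0)) := by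
  unfold pvPos
  rcases le_or_gt remainder k with h | h
  · rw [min_eq_right h, min_eq_right (by omega), if_neg (by omega)]; ring
  · rw [min_eq_left (by omega), min_eq_left (by omega), if_pos h]; ring

-- A's fold over range n produces the map of consecutive closed-form pairs, ending at pos n
lemma pvFold_eq (base remainder : Int) (hr : 0 ≤ remainder) (n : Nat) :
    ((List.range n).map (fun k : Nat => (k : Int))).foldl
      (fun (acc : List (Int × Int) × Int) (i : Int) =>
        (acc.1 ++ [(acc.2, acc.2 + (base + (if i < remainder then 1 else 0)))],
          acc.2 + (base + (if i < remainder then 1 else 0))))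
      (([] : List (Int × Int)), (0 : Int)) =
    ((List.range n).map (fun k : Nat => (pvPos base remainder k, pvPos base remainder (k + 1))),
      pvPos base remainder n) := by
  induction n with
  | zero => simp [pvPos, min_eq_left hr]
  | succ m ih =>
      rw [List.range_succ, List.map_append, List.foldl_append, ih,
        List.map_append]
      simp only [List.map_cons, List.map_nil, List.foldl_cons, List.foldl_nil]
      have hc : ((m + 1 : Nat) : Int) = (m : Int) + 1 := by push_cast; ring
      rw [hc, pvPos_step base remainder m]

-- B's zip of the position list with its tail equals the same map of consecutive pairs
lemma pvZip_eq (base remainder : Int) (n : Nat) :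
    (((List.range (n + 1)).map (fun k : Nat => (k : Int))).map
        (fun i => i * base + min i remainder)).zip
      ((((List.range (n + 1)).map (fun k : Nat => (k : Int))).map
        (fun i => i * base + min i remainder)).tail) =
    (List.range n).map (fun k : Nat => (pvPos base remainder k, pvPos base remainder (k + 1))) := by
  apply List.ext_getElem
  · simp [List.length_zip]
  · intro k h1 h2
    simp only [List.length_zip, List.length_map, List.length_range, List.length_tail] at h1
    have hk : k < n := by omega
    simp [List.getElem_zip, List.getElem_tail, pvPos]

theorem calculate_split_boundaries_py_spec_aux (dimension num_splits : Int) :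
    calculate_split_boundaries_py dimension num_splits =
      calculate_split_boundaries_py_alt dimension num_splits := by
  unfold calculate_split_boundaries_py calculate_split_boundaries_py_alt
  by_cases h : num_splits ≤ 0
  · simp [h]
  · simp only [if_neg h]
    have hpos : (0:Int) < num_splits := by omega
    have hr : 0 ≤ PySem.Int.mod dimension num_splits := PySem.Int.mod_nonneg dimension hpos
    rw [PySem.List.pyRange_one, PySem.List.pyRange_one]
    have h1 : (num_splits - 0).toNat = num_splits.toNat := by omega
    have h2 : (num_splits + 1 - 0).toNat = num_splits.toNat + 1 := by omega
    rw [h1, h2]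
    simp only [zero_add]
    rw [pvFold_eq _ _ hr, pvZip_eq]

-- ===== VERDICT (by name: the statement is the Claim_ definition above) =====
theorem calculate_split_boundaries_py_spec : Claim_equal_calculate_split_boundaries_py := by
  intro d n _
  unfold Spec_calculate_split_boundaries_py
  exact calculate_split_boundaries_py_spec_aux d n
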